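-- pv_equiv track=rewrite | github.com/SilenceLY05/ICEEMDAN-SVD-BES-TWSVM | (5.21)SABES(自适应BES)+TWSVM/main.py | generate_event_info
-- ===== SOURCE A (Python) =====
-- def generate_event_info(y_pred, max_x_coords, window_size=10):
--     events_info = []
--     event_start, event_end, event_position = None, None, None
--     max_y_value, max_y_index = None, None
--
--     for i, label in enumerate(y_pred):
--         if label in [1, 2, 3, 4, 5]:  # 事件标签
--             if event_start is None:
--                 event_start = i * window_size  # 窗口起始点
--             event_end = (i + 1) * window_size  # 窗口结束点
--
--             # 更新事件范围内的最大值和位置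
--             current_max_x_coord = max_x_coords[i]
--             if max_y_value is None or current_max_x_coord > max_y_value:
--                 max_y_value = current_max_x_coord
--                 event_position = current_max_x_coord
--
--         else:
--             if event_start is not None:
--                 events_info.append([event_start, event_end, event_position])
--                 event_start, event_end, max_y_value, event_position = None, None, None, None
--
--     if event_start is not None:
--         events_info.append([event_start, event_end, event_position])
--
--     return events_info
-- ===== SOURCE B (Python) =====
-- from itertools import groupby
--
-- def generate_event_info(y_pred, max_x_coords, window_size=10):
--     events_info = []
--     for is_event, group in groupby(enumerate(y_pred), key=lambda p: p[1] in {1, 2, 3, 4, 5}):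
--         if is_event:
--             idxs = [i for i, _ in group]
--             events_info.append([idxs[0] * window_size,
--                                 (idxs[-1] + 1) * window_size,
--                                 max(max_x_coords[i] for i in idxs)])
--     return events_info
-- ===== Notes on version B (the rewrite author's own statement) =====
-- stated objective: alternative
-- what changed: Replaced A's incremental state machine (five pieces of Optional running state updated per element, flushed on run end) by a group-then-reduce pass: itertools.groupby splits enumerate(y_pred) into maximal runs of event labels and each True run is reduced en bloc to [first*ws, (last+1)*ws, max].
import Mathlib
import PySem

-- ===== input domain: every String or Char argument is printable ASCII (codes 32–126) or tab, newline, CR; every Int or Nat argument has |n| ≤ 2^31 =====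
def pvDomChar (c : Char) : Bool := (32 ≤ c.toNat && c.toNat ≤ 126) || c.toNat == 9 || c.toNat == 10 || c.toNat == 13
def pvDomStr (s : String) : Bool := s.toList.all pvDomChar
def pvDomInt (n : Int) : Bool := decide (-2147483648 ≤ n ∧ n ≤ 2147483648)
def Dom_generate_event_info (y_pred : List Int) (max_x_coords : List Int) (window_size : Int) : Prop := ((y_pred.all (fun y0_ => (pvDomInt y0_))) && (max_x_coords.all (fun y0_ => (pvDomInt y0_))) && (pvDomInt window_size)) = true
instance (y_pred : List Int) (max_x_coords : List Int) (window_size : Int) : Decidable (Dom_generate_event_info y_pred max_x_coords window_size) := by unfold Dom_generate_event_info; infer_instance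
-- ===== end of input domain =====

-- B replaces A's incremental state-machine scan (five pieces of Optional running state) by a
-- group-then-reduce pass: groupby splits enumerate(y_pred) into maximal runs of event labels and
-- each run is reduced en bloc (first index, last index, max).  Objective: alternative (same O(n)).

-- `label in [1, 2, 3, 4, 5]` (shared by both programs)
def geiIsEvt (l : Int) : Bool := l == 1 || l == 2 || l == 3 || l == 4 || l == 5

-- `max_x_coords[i]`; total form — Pre_ excludes the inputs where Python raises IndexError here
def geiGet (mxc : List Int) (i : Int) : Int := (PySem.List.pyGet? mxc i).getD 0

-- ===== PORT A =====
-- state = (events_info, event_start, event_end, event_position, max_y_value)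
def geiStep (mxc : List Int) (ws : Int)
    (s : List (List Int) × Option Int × Option Int × Option Int × Option Int)
    (p : Int × Int) :
    List (List Int) × Option Int × Option Int × Option Int × Option Int :=
  let (evs, st, en, pos, mv) := s
  let (i, label) := p
  if geiIsEvt label then
    let st' := match st with | none => some (i * ws) | some x => some x
    let en' := some ((i + 1) * ws)
    let c := geiGet mxc i
    match mv with
    | none => (evs, st', en', some c, some c)
    | some m => if c > m then (evs, st', en', some c, some c) else (evs, st', en', pos, some m)
  else
    match st with
    | some s0 => (evs ++ [[s0, en.getD 0, pos.getD 0]], none, none, none, none)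
    | none => (evs, st, en, pos, mv)

-- the trailing `if event_start is not None: append` after the loop
def geiFinish (s : List (List Int) × Option Int × Option Int × Option Int × Option Int) :
    List (List Int) :=
  match s with
  | (evs, some s0, en, pos, _) => evs ++ [[s0, en.getD 0, pos.getD 0]]
  | (evs, none, _, _, _) => evs

def generate_event_info (y_pred : List Int) (max_x_coords : List Int) (window_size : Int) :
    List (List Int) :=
  geiFinish ((PySem.List.enumerate y_pred).foldl (geiStep max_x_coords window_size)
    ([], none, none, none, none))

-- ===== PORT B =====
-- groupby(enumerate(y_pred), key = label in {1..5}): each iteration takes one maximal group;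
-- a True group is reduced to [first*ws, (last+1)*ws, max over the group], a False group is skipped.
def geiGo (mxc : List Int) (ws : Int) : List (Int × Int) → List (List Int)
  | [] => []
  | (i, l) :: rest =>
    if geiIsEvt l then
      let run := (i, l) :: rest.takeWhile (fun p => geiIsEvt p.2)
      let idxs := run.map Prod.fst
      let i0 := idxs.headD 0
      let ik := idxs.getLastD 0
      let m := idxs.tail.foldl (fun a j => max a (geiGet mxc j)) (geiGet mxc i0)
      [i0 * ws, (ik + 1) * ws, m] :: geiGo mxc ws (rest.dropWhile (fun p => geiIsEvt p.2))
    else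
      geiGo mxc ws (rest.dropWhile (fun p => !geiIsEvt p.2))
  termination_by xs => xs.length
  decreasing_by
  · exact Nat.lt_succ_of_le (List.length_dropWhile_le _ _)
  · exact Nat.lt_succ_of_le (List.length_dropWhile_le _ _)

def generate_event_info_alt (y_pred : List Int) (max_x_coords : List Int) (window_size : Int) :
    List (List Int) :=
  geiGo max_x_coords window_size (PySem.List.enumerate y_pred)

-- ===== PRECONDITION & SPEC =====
-- Pre_ excludes exactly the inputs where Python A (and B) raise IndexError: an event label at a
-- position i with no corresponding entry in max_x_coords.
def Pre_generate_event_info (y_pred : List Int) (max_x_coords : List Int) (window_size : Int) : Prop :=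
  ∀ p ∈ PySem.List.enumerate y_pred, geiIsEvt p.2 = true → p.1 < (max_x_coords.length : Int)

instance (y_pred : List Int) (max_x_coords : List Int) (window_size : Int) : Decidable (Pre_generate_event_info y_pred max_x_coords window_size) := by unfold Pre_generate_event_info; infer_instance

def pvWitness_generate_event_info : List Int × List Int × Int := ([1, 0, 2, 2], [5, 0, 7, 3], 10)

def Spec_generate_event_info (y_pred : List Int) (max_x_coords : List Int) (window_size : Int) (out : List (List Int)) : Prop := out = generate_event_info_alt y_pred max_x_coords window_size
instance (y_pred : List Int) (max_x_coords : List Int) (window_size : Int) (out : List (List Int)) : Decidable (Spec_generate_event_info y_pred max_x_coords window_size out) := by unfold Spec_generate_event_info; infer_instance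

-- ===== CLAIM (what is proved, stated in full; the proofs are below) =====
def Claim_equal_generate_event_info : Prop := ∀ (y_pred : List Int) (max_x_coords : List Int) (window_size : Int), Dom_generate_event_info y_pred max_x_coords window_size → Pre_generate_event_info y_pred max_x_coords window_size → Spec_generate_event_info y_pred max_x_coords window_size (generate_event_info y_pred max_x_coords window_size)

-- ===== LEMMAS AND PROOFS =====

-- proof-side recursive descriptions of what a run contributes
def geiRunEnd (ws : Int) (en : Int) : List (Int × Int) → Int
  | [] => en
  | (j, l) :: t => if geiIsEvt l then geiRunEnd ws ((j + 1) * ws) t else en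

def geiRunMax (mxc : List Int) (mv : Int) : List (Int × Int) → Int
  | [] => mv
  | (j, l) :: t =>
    if geiIsEvt l then geiRunMax mxc (if geiGet mxc j > mv then geiGet mxc j else mv) t else mv

theorem geiGo_dropFalse (mxc : List Int) (ws : Int) (xs : List (Int × Int)) :
    geiGo mxc ws (xs.dropWhile (fun p => !geiIsEvt p.2)) = geiGo mxc ws xs := by
  match xs with
  | [] => simp [List.dropWhile]
  | (i, l) :: rest =>
    by_cases h : geiIsEvt l
    · simp [List.dropWhile, h]
    · rw [List.dropWhile]
      simp only [h, Bool.not_false]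
      rw [geiGo]
      simp [h]

theorem geiRunEnd_eq (ws : Int) (i : Int) (t : List (Int × Int)) :
    (((t.takeWhile (fun p => geiIsEvt p.2)).map Prod.fst).getLastD i + 1) * ws
      = geiRunEnd ws ((i + 1) * ws) t := by
  induction t generalizing i with
  | nil => simp [geiRunEnd]
  | cons p t ih =>
    obtain ⟨j, l⟩ := p
    by_cases h : geiIsEvt l
    · rw [List.takeWhile_cons]
      simp only [h, if_true]
      rw [List.map_cons, List.getLastD_cons, geiRunEnd]
      simp only [h, if_true]
      exact ih j
    · rw [List.takeWhile_cons]
      simp [h, geiRunEnd]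

theorem geiRunMax_eq (mxc : List Int) (mv : Int) (t : List (Int × Int)) :
    ((t.takeWhile (fun p => geiIsEvt p.2)).map Prod.fst).foldl
        (fun a j => max a (geiGet mxc j)) mv
      = geiRunMax mxc mv t := by
  induction t generalizing mv with
  | nil => simp [geiRunMax]
  | cons p t ih =>
    obtain ⟨j, l⟩ := p
    by_cases h : geiIsEvt l
    · rw [List.takeWhile_cons]
      simp only [h, if_true]
      rw [List.map_cons, List.foldl_cons, geiRunMax]
      simp only [h, if_true]
      rw [← ih]
      congr 1
      rw [max_def]
      split_ifs <;> omega
    · rw [List.takeWhile_cons]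
      simp [h, geiRunMax]

-- the joint invariant of A's fold, by structural induction on the remaining pairs
theorem geiMain (mxc : List Int) (ws : Int) (xs : List (Int × Int)) :
    (∀ evs, geiFinish (xs.foldl (geiStep mxc ws) (evs, none, none, none, none))
        = evs ++ geiGo mxc ws xs) ∧
    (∀ evs s0 en mv,
      geiFinish (xs.foldl (geiStep mxc ws) (evs, some s0, some en, some mv, some mv))
        = evs ++ [s0, geiRunEnd ws en xs, geiRunMax mxc mv xs]
            :: geiGo mxc ws (xs.dropWhile (fun p => geiIsEvt p.2))) := by
  induction xs with
  | nil =>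
    constructor
    · intro evs; simp [geiFinish, geiGo]
    · intro evs s0 en mv
      simp [geiFinish, geiRunEnd, geiRunMax, List.dropWhile, geiGo]
  | cons p rest ih =>
    obtain ⟨i, l⟩ := p
    obtain ⟨ihN, ihR⟩ := ih
    constructor
    · intro evs
      by_cases h : geiIsEvt l
      · rw [List.foldl_cons]
        show geiFinish (rest.foldl (geiStep mxc ws) (geiStep mxc ws (evs, none, none, none, none) (i, l))) = _
        rw [geiStep]
        simp only [h, if_true]
        rw [ihR]
        rw [geiGo]
        simp only [h, if_true]
        have hend := geiRunEnd_eq ws i rest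
        have hmax := geiRunMax_eq mxc (geiGet mxc i) rest
        simp only [List.map_cons, List.headD_cons, List.getLastD_cons, List.tail_cons]
        rw [hend, ← hmax]
      · rw [List.foldl_cons]
        show geiFinish (rest.foldl (geiStep mxc ws) (geiStep mxc ws (evs, none, none, none, none) (i, l))) = _
        rw [geiStep]
        simp only [h, if_false, Bool.false_eq_true]
        rw [ihN]
        rw [geiGo]
        simp only [h, if_false, Bool.false_eq_true]
        rw [geiGo_dropFalse]
    · intro evs s0 en mv
      by_cases h : geiIsEvt l
      · rw [List.foldl_cons]
        show geiFinish (rest.foldl (geiStep mxc ws) (geiStep mxc ws (evs, some s0, some en, some mv, some mv) (i, l))) = _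
        rw [geiStep]
        simp only [h, if_true]
        by_cases hc : geiGet mxc i > mv
        · simp only [hc, if_true]
          rw [ihR]
          rw [List.dropWhile_cons]
          simp only [h, if_true]
          rw [geiRunEnd, geiRunMax]
          simp only [h, if_true, hc, if_true]
        · simp only [hc, if_false]
          rw [ihR]
          rw [List.dropWhile_cons]
          simp only [h, if_true]
          rw [geiRunEnd, geiRunMax]
          simp only [h, if_true, hc, if_false]
      · rw [List.foldl_cons]
        show geiFinish (rest.foldl (geiStep mxc ws) (geiStep mxc ws (evs, some s0, some en, some mv, some mv) (i, l))) = _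
        rw [geiStep]
        simp only [h, if_false, Bool.false_eq_true]
        rw [ihN]
        rw [List.dropWhile_cons]
        simp only [h, Bool.false_eq_true, if_false]
        rw [geiRunEnd, geiRunMax]
        simp only [h, Bool.false_eq_true, if_false]
        rw [geiGo]
        simp only [h, Bool.false_eq_true, if_false]
        rw [geiGo_dropFalse]
        simp

-- ===== VERDICT (by name: the statement is the Claim_ definition above) =====
theorem generate_event_info_spec : Claim_equal_generate_event_info := by
  intro y_pred max_x_coords window_size _ _
  unfold Spec_generate_event_info generate_event_info generate_event_info_alt
  simpa using (geiMain max_x_coords window_size (PySem.List.enumerate y_pred)).1 []
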